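-- pv_equiv track=rewrite | github.com/bskogman/AdventOfCode2021 | Day12/Day12.py | remove_dupe_smalls
-- ===== SOURCE A (Python) =====
-- def remove_dupe_smalls(paths:list[list[str]]):
--     new_paths = []
--     for i in range(0,len(paths)):
--         append_flag = 1
--         lower_seen = []
--         new_list = []
--         for j in range(0,len(paths[i])):
--             if paths[i][j] not in lower_seen:
--                 new_list.append(paths[i][j])
--                 if paths[i][j] != paths[i][j].upper():
--                     lower_seen.append(paths[i][j])
--             else:
--                 append_flag = 0
--         if append_flag == 1:
--             new_paths.append(new_list)
--     return new_paths
-- ===== SOURCE B (Python) =====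
-- def remove_dupe_smalls(paths: list[list[str]]):
--     new_paths = []
--     for p in paths:
--         lowers = [x for x in p if x != x.upper()]
--         if len(lowers) == len(set(lowers)):
--             new_paths.append(list(p))
--     return new_paths
-- ===== Notes on version B (the rewrite author's own statement) =====
-- stated objective: simpler
-- what changed: B drops the incremental seen-list membership scans, append flag and element-by-element rebuild, and instead keeps (a copy of) each path iff its lowercase elements are pairwise distinct, checked by comparing len(lowers) with len(set(lowers)).
import Mathlib
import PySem

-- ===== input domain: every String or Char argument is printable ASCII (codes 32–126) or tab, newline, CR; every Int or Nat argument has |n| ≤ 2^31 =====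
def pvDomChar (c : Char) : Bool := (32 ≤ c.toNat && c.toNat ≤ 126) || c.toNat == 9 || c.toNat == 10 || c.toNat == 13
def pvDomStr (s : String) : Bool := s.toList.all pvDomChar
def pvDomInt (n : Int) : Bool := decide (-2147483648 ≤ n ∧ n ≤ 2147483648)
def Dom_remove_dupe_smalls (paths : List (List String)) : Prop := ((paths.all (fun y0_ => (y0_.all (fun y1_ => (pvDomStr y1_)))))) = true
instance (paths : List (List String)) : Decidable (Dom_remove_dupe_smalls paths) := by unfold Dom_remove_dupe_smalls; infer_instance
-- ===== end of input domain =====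

-- B replaces A's incremental seen-list scans / append-flag / element-by-element rebuild with a
-- collect-then-compare filter (keep a path iff its lowercase elements are pairwise distinct); objective: simpler.

-- ===== PORT A =====
-- inner 'for j' loop of A: state = (append_flag, lower_seen, new_list), one element at a time
def pvInnerA : List String → Nat → List String → List String → Nat × List String
  | [], flag, _seen, acc => (flag, acc)
  | x :: rest, flag, seen, acc =>
    if x ∉ seen then
      if x ≠ PySem.Str.upper x then pvInnerA rest flag (seen ++ [x]) (acc ++ [x])
      else pvInnerA rest flag seen (acc ++ [x])
    else pvInnerA rest 0 seen acc

def remove_dupe_smalls (paths : List (List String)) : List (List String) :=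
  paths.foldl (fun new_paths p =>
    let r := pvInnerA p 1 [] []
    if r.1 = 1 then new_paths ++ [r.2] else new_paths) []

-- ===== PORT B =====
def remove_dupe_smalls_alt (paths : List (List String)) : List (List String) :=
  paths.foldl (fun new_paths p =>
    let lowers := p.filter (fun x => decide (x ≠ PySem.Str.upper x))
    if (PySem.Set.ofList lowers).length = lowers.length then new_paths ++ [p] else new_paths) []

-- ===== PRECONDITION & SPEC =====
def Spec_remove_dupe_smalls (paths : List (List String)) (out : List (List String)) : Prop := out = remove_dupe_smalls_alt paths
instance (paths : List (List String)) (out : List (List String)) : Decidable (Spec_remove_dupe_smalls paths out) := by unfold Spec_remove_dupe_smalls; infer_instance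

-- ===== CLAIM (what is proved, stated in full; the proofs are below) =====
def Claim_equal_remove_dupe_smalls : Prop := ∀ (paths : List (List String)), Dom_remove_dupe_smalls paths → Spec_remove_dupe_smalls paths (remove_dupe_smalls paths)

-- ===== LEMMAS AND PROOFS =====

theorem pvInnerA_cons (x : String) (r : List String) (flag : Nat) (seen acc : List String) :
    pvInnerA (x :: r) flag seen acc =
      if x ∉ seen then
        if x ≠ PySem.Str.upper x then pvInnerA r flag (seen ++ [x]) (acc ++ [x])
        else pvInnerA r flag seen (acc ++ [x])
      else pvInnerA r 0 seen acc := rfl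

-- once the flag is 0 it stays 0
theorem pvInnerA_flag0 : ∀ (rest seen acc : List String), (pvInnerA rest 0 seen acc).1 = 0 := by
  intro rest
  induction rest with
  | nil => intro seen acc; rfl
  | cons x r ih =>
    intro seen acc
    rw [pvInnerA_cons]
    split_ifs <;> exact ih _ _

-- kept case: no duplicate lowercase element ⇒ the flag survives and new_list rebuilds the path
theorem pvInnerA_nodup : ∀ (rest seen acc : List String) (flag : Nat),
    (∀ y ∈ seen, y ≠ PySem.Str.upper y) →
    (seen ++ rest.filter (fun x => decide (x ≠ PySem.Str.upper x))).Nodup →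
    pvInnerA rest flag seen acc = (flag, acc ++ rest) := by
  intro rest
  induction rest with
  | nil => intro seen acc flag _ _; simp [pvInnerA]
  | cons x r ih =>
    intro seen acc flag hseen hnd
    by_cases hlow : x = PySem.Str.upper x
    · have hcond : (decide (x ≠ PySem.Str.upper x)) = false :=
        decide_eq_false (not_not_intro hlow)
      have hfilter : (x :: r).filter (fun x => decide (x ≠ PySem.Str.upper x))
          = r.filter (fun x => decide (x ≠ PySem.Str.upper x)) := by
        rw [List.filter_cons, hcond]; simp
      rw [hfilter] at hnd
      have hx : x ∉ seen := fun hx => (hseen x hx) hlow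
      rw [pvInnerA_cons, if_pos hx, if_neg (fun h => h hlow)]
      rw [ih seen (acc ++ [x]) flag hseen hnd]
      simp
    · have hcond : (decide (x ≠ PySem.Str.upper x)) = true := decide_eq_true hlow
      have hfilter : (x :: r).filter (fun x => decide (x ≠ PySem.Str.upper x))
          = x :: r.filter (fun x => decide (x ≠ PySem.Str.upper x)) := by
        rw [List.filter_cons, hcond]; simp
      rw [hfilter] at hnd
      have hx : x ∉ seen := fun hx =>
        (List.disjoint_of_nodup_append hnd) hx (List.mem_cons_self)
      have hnd' : ((seen ++ [x]) ++ r.filter (fun x => decide (x ≠ PySem.Str.upper x))).Nodup := by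
        simpa [List.append_assoc] using hnd
      have hseen' : ∀ y ∈ seen ++ [x], y ≠ PySem.Str.upper y := by
        intro y hy
        rcases List.mem_append.mp hy with h | h
        · exact hseen y h
        · simp at h; subst h; exact hlow
      rw [pvInnerA_cons, if_pos hx, if_pos hlow]
      rw [ih (seen ++ [x]) (acc ++ [x]) flag hseen' hnd']
      simp

-- dropped case: a duplicate lowercase element ⇒ the flag ends 0
theorem pvInnerA_dup : ∀ (rest seen acc : List String) (flag : Nat),
    seen.Nodup →
    (∀ y ∈ seen, y ≠ PySem.Str.upper y) →
    ¬ (seen ++ rest.filter (fun x => decide (x ≠ PySem.Str.upper x))).Nodup →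
    (pvInnerA rest flag seen acc).1 = 0 := by
  intro rest
  induction rest with
  | nil =>
    intro seen acc flag hsn _ hnd
    exact absurd (by simpa using hsn : (seen ++ ([] : List String).filter (fun x => decide (x ≠ PySem.Str.upper x))).Nodup) hnd
  | cons x r ih =>
    intro seen acc flag hsn hseen hnd
    by_cases hmem : x ∈ seen
    · rw [pvInnerA_cons, if_neg (not_not_intro hmem)]
      exact pvInnerA_flag0 _ _ _
    · by_cases hlow : x = PySem.Str.upper x
      · have hcond : (decide (x ≠ PySem.Str.upper x)) = false :=
          decide_eq_false (not_not_intro hlow)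
        have hfilter : (x :: r).filter (fun x => decide (x ≠ PySem.Str.upper x))
            = r.filter (fun x => decide (x ≠ PySem.Str.upper x)) := by
          rw [List.filter_cons, hcond]; simp
        rw [hfilter] at hnd
        rw [pvInnerA_cons, if_pos hmem, if_neg (fun h => h hlow)]
        exact ih seen (acc ++ [x]) flag hsn hseen hnd
      · have hcond : (decide (x ≠ PySem.Str.upper x)) = true := decide_eq_true hlow
        have hfilter : (x :: r).filter (fun x => decide (x ≠ PySem.Str.upper x))
            = x :: r.filter (fun x => decide (x ≠ PySem.Str.upper x)) := by
          rw [List.filter_cons, hcond]; simp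
        rw [hfilter] at hnd
        have hnd' : ¬ ((seen ++ [x]) ++ r.filter (fun x => decide (x ≠ PySem.Str.upper x))).Nodup := by
          intro h; exact hnd (by simpa [List.append_assoc] using h)
        have hsn' : (seen ++ [x]).Nodup :=
          hsn.append (List.nodup_singleton x)
            (fun {a} ha hx => hmem ((List.mem_singleton.mp hx) ▸ ha))
        have hseen' : ∀ y ∈ seen ++ [x], y ≠ PySem.Str.upper y := by
          intro y hy
          rcases List.mem_append.mp hy with h | h
          · exact hseen y h
          · simp at h; subst h; exact hlow
        rw [pvInnerA_cons, if_pos hmem, if_pos hlow]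
        exact ih (seen ++ [x]) (acc ++ [x]) flag hsn' hseen' hnd'

theorem hadd_mem (s : List String) (x : String) (hx : x ∈ s) : PySem.Set.add s x = s := by
  simp [PySem.Set.add, PySem.Set.contains, hx]

theorem hadd_nmem (s : List String) (x : String) (hx : x ∉ s) : PySem.Set.add s x = s ++ [x] := by
  simp [PySem.Set.add, PySem.Set.contains, hx]

-- building set(l) by repeated add: exact value when l is duplicate-free …
theorem foldl_add_nodup : ∀ (l s : List String), (s ++ l).Nodup →
    l.foldl PySem.Set.add s = s ++ l := by
  intro l
  induction l with
  | nil => intro s _; simp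
  | cons x r ih =>
    intro s hnd
    have hx : x ∉ s := fun hx =>
      (List.disjoint_of_nodup_append hnd) hx (List.mem_cons_self)
    rw [List.foldl_cons, hadd_nmem s x hx]
    rw [ih (s ++ [x]) (by simpa [List.append_assoc] using hnd)]
    simp

-- … an upper length bound always …
theorem foldl_add_le : ∀ (l s : List String),
    (l.foldl PySem.Set.add s).length ≤ s.length + l.length := by
  intro l
  induction l with
  | nil => intro s; simp
  | cons x r ih =>
    intro s
    rw [List.foldl_cons]
    have h1 := ih (PySem.Set.add s x)
    have h2 : (PySem.Set.add s x).length ≤ s.length + 1 := by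
      by_cases hx : x ∈ s
      · rw [hadd_mem s x hx]; omega
      · rw [hadd_nmem s x hx]; simp
    simp only [List.length_cons]
    omega

-- … and a strict bound when there is a duplicate
theorem foldl_add_lt : ∀ (l s : List String), s.Nodup → ¬ (s ++ l).Nodup →
    (l.foldl PySem.Set.add s).length < s.length + l.length := by
  intro l
  induction l with
  | nil => intro s hsn hnd; exact absurd (by simpa using hsn) hnd
  | cons x r ih =>
    intro s hsn hnd
    by_cases hx : x ∈ s
    · rw [List.foldl_cons, hadd_mem s x hx]
      have := foldl_add_le r s
      simp only [List.length_cons]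
      omega
    · rw [List.foldl_cons, hadd_nmem s x hx]
      have hnd' : ¬ ((s ++ [x]) ++ r).Nodup := by
        intro h; exact hnd (by simpa [List.append_assoc] using h)
      have hsn' : (s ++ [x]).Nodup :=
        hsn.append (List.nodup_singleton x)
          (fun {a} ha hxx => hx ((List.mem_singleton.mp hxx) ▸ ha))
      have := ih (s ++ [x]) hsn' hnd'
      simp only [List.length_append, List.length_cons, List.length_nil] at this ⊢
      omega

theorem setLen_eq_iff (l : List String) :
    (PySem.Set.ofList l).length = l.length ↔ l.Nodup := by
  constructor
  · intro h
    by_contra hnd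
    have hlt := foldl_add_lt l [] List.nodup_nil (by simpa using hnd)
    rw [PySem.Set.ofList_eq_foldl] at h
    simp only [List.length_nil] at hlt
    omega
  · intro hnd
    rw [PySem.Set.ofList_eq_foldl, foldl_add_nodup l [] (by simpa using hnd)]
    simp

-- the two per-path step functions agree
theorem step_eq (acc : List (List String)) (p : List String) :
    (let r := pvInnerA p 1 [] []
     if r.1 = 1 then acc ++ [r.2] else acc)
    = (let lowers := p.filter (fun x => decide (x ≠ PySem.Str.upper x))
       if (PySem.Set.ofList lowers).length = lowers.length then acc ++ [p] else acc) := by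
  by_cases hnd : (p.filter (fun x => decide (x ≠ PySem.Str.upper x))).Nodup
  · have hA : pvInnerA p 1 [] [] = (1, p) := by
      simpa using pvInnerA_nodup p [] [] 1 (by simp) (by simpa using hnd)
    have hB : (PySem.Set.ofList (p.filter (fun x => decide (x ≠ PySem.Str.upper x)))).length
        = (p.filter (fun x => decide (x ≠ PySem.Str.upper x))).length :=
      (setLen_eq_iff _).mpr hnd
    show (if (pvInnerA p 1 [] []).1 = 1 then acc ++ [(pvInnerA p 1 [] []).2] else acc) = _
    rw [hA]
    simp
    simpa using hB
  · have hA : (pvInnerA p 1 [] []).1 = 0 :=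
      pvInnerA_dup p [] [] 1 (by simp) (by simp) (by simpa using hnd)
    have hB : (PySem.Set.ofList (p.filter (fun x => decide (x ≠ PySem.Str.upper x)))).length
        ≠ (p.filter (fun x => decide (x ≠ PySem.Str.upper x))).length := by
      intro h; exact hnd ((setLen_eq_iff _).mp h)
    show (if (pvInnerA p 1 [] []).1 = 1 then acc ++ [(pvInnerA p 1 [] []).2] else acc) = _
    rw [hA]
    simp
    simpa using hB

-- the two outer loops agree step by step
theorem fold_eq : ∀ (paths acc : List (List String)),
    paths.foldl (fun new_paths p =>
      let r := pvInnerA p 1 [] []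
      if r.1 = 1 then new_paths ++ [r.2] else new_paths) acc
    = paths.foldl (fun new_paths p =>
      let lowers := p.filter (fun x => decide (x ≠ PySem.Str.upper x))
      if (PySem.Set.ofList lowers).length = lowers.length then new_paths ++ [p] else new_paths) acc := by
  intro paths
  induction paths with
  | nil => intro acc; rfl
  | cons p r ih =>
    intro acc
    rw [List.foldl_cons, List.foldl_cons, ih]
    congr 1
    exact step_eq acc p

-- ===== VERDICT (by name: the statement is the Claim_ definition above) =====
theorem remove_dupe_smalls_spec : Claim_equal_remove_dupe_smalls := by
  intro paths _
  show remove_dupe_smalls paths = remove_dupe_smalls_alt paths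
  exact fold_eq paths []
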